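-- pv_equiv track=rewrite | github.com/Ford-z/LeetCode | LCP 17 速算机器人.py | calculate
-- ===== SOURCE A (Python) =====
-- def calculate(s: str) -> int:
--     x=1
--     y=0
--     ans=0
--     for i in range(len(s)):
--         if(s[i]=="A"):
--             x=2*x+y
--         if(s[i]=="B"):
--             y=y*2+x
--     ans=x+y
--     return ans
-- ===== SOURCE B (Python) =====
-- def calculate(s: str) -> int:
--     # x + y doubles on each 'A' or 'B' and is unchanged otherwise, starting at 1
--     return 2 ** sum(c in "AB" for c in s)
-- ===== Notes on version B (the rewrite author's own statement) =====
-- stated objective: faster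
-- what changed: Replaces the two-variable state loop by the closed form 2^(count of 'A'/'B' characters), since x+y doubles on each such character.
import Mathlib
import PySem

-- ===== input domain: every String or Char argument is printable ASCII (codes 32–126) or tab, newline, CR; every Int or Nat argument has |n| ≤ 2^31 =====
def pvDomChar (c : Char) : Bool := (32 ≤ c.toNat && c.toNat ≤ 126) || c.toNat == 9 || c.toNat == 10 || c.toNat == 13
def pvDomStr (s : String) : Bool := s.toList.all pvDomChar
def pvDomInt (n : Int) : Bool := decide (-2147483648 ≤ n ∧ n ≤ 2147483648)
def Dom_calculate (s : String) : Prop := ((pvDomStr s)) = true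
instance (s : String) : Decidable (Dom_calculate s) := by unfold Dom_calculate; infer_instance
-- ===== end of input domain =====

-- B replaces A's two-variable loop by the closed form 2^(count of 'A'/'B' chars); equivalence proved on all strings.


-- ===== PORT A =====
-- step for one character: two sequential ifs, second sees the updated x, as in A
def calcStep (p : Int × Int) (c : Char) : Int × Int :=
  let p1 := if c = 'A' then (2 * p.1 + p.2, p.2) else p
  if c = 'B' then (p1.1, p1.2 * 2 + p1.1) else p1

def calculate (s : String) : Int :=
  let p := s.toList.foldl calcStep (1, 0)
  p.1 + p.2

-- ===== PORT B =====
def calculate_alt (s : String) : Int :=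
  (2 : Int) ^ (s.toList.countP (fun c => c == 'A' || c == 'B'))

-- ===== PRECONDITION & SPEC =====
def Spec_calculate (s : String) (out : Int) : Prop := out = calculate_alt s
instance (s : String) (out : Int) : Decidable (Spec_calculate s out) := by unfold Spec_calculate; infer_instance

-- ===== CLAIM (what is proved, stated in full; the proofs are below) =====
def Claim_equal_calculate : Prop := ∀ (s : String), Dom_calculate s → Spec_calculate s (calculate s)

-- ===== LEMMAS AND PROOFS =====

theorem calc_fold_sum (l : List Char) (x y : Int) :
    (l.foldl calcStep (x, y)).1 + (l.foldl calcStep (x, y)).2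
      = (x + y) * 2 ^ (l.countP (fun c => c == 'A' || c == 'B')) := by
  induction l generalizing x y with
  | nil => simp
  | cons c t ih =>
    simp only [List.foldl_cons, List.countP_cons]
    by_cases hA : c = 'A'
    · simp [calcStep, hA, ih]; ring
    · by_cases hB : c = 'B'
      · simp [calcStep, hB, ih]; ring
      · simp [calcStep, hA, hB, ih]

-- ===== VERDICT (by name: the statement is the Claim_ definition above) =====
theorem calculate_spec : Claim_equal_calculate := by
  intro s _
  show _ = _
  simp [calculate, calculate_alt, calc_fold_sum]
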